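-- pv_equiv track=rewrite | github.com/pypi-data/pypi-mirror-380 | packages/yangsuite-restconf/yangsuite_restconf-2.1.12-py3-none-any.whl/ysrestconf/ansible.py | remove_path_params
-- ===== SOURCE A (Python) =====
-- def remove_path_params(path) -> str:
--     if '/' not in path and '=' not in path:
--         return path
--
--     tokens = path.split('/')
--     # Preserve token before equal sign for all path tokens
--     formatted_path = '/'.join([
--         token.split('=')[0]
--         if '=' in token else token
--         for token in tokens
--     ])
--     # Trim empty spaces
--     formatted_path = formatted_path.replace(' ', '')
--     # Trim invalid chars
--     formatted_path = formatted_path.replace('{', '')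
--     formatted_path = formatted_path.replace('}', '')
--
--     return formatted_path
-- ===== SOURCE B (Python) =====
-- def remove_path_params(path) -> str:
--     if '/' not in path and '=' not in path:
--         return path
--
--     out = []
--     dropping = False
--     for ch in path:
--         if ch == '/':
--             dropping = False
--             out.append('/')
--         elif ch == '=':
--             dropping = True
--         elif not dropping and ch not in ' {}':
--             out.append(ch)
--     return ''.join(out)
-- ===== Notes on version B (the rewrite author's own statement) =====
-- stated objective: simpler
-- what changed: Replaced the split-on-slash / split-on-equals / join pipeline plus three character-removal passes by a single left-to-right scan with a drop-flag set at an equals sign and cleared at a slash, filtering the invalid characters on the fly.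
import Mathlib
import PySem

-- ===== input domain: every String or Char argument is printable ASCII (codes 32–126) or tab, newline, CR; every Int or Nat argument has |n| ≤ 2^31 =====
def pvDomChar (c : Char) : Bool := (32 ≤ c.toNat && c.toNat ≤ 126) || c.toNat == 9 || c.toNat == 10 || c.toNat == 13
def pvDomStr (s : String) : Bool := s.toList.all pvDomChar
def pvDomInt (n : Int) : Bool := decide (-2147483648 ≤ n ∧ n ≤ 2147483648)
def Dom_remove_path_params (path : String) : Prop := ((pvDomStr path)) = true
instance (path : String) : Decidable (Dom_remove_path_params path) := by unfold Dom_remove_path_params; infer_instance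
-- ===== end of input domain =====

-- B: one left-to-right scan with a drop-flag instead of the split/join pipeline plus three replace passes (objective: simpler).

-- ===== PORT A =====
-- token.split('=')[0]: split results are always nonempty, so [0] is their head (headD [] never takes its default)
def rppToken (token : List Char) : List Char :=
  if PySem.Chars.isIn ['='] token then (PySem.Chars.splitOn token ['=']).headD [] else token

def remove_path_params (path : String) : String :=
  if !(PySem.Str.isIn "/" path) && !(PySem.Str.isIn "=" path) then path
  else
    let tokens := PySem.Chars.splitOn path.toList ['/']
    let formatted_path := PySem.Chars.join ['/'] (tokens.map rppToken)
    let fp1 := PySem.Chars.replace formatted_path [' '] []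
    let fp2 := PySem.Chars.replace fp1 ['{'] []
    let fp3 := PySem.Chars.replace fp2 ['}'] []
    String.ofList fp3

-- ===== PORT B =====
def rppScan : Bool → List Char → List Char
  | _, [] => []
  | dropping, c :: r =>
    if c = '/' then '/' :: rppScan false r
    else if c = '=' then rppScan true r
    else if !dropping && !(c == ' ' || c == '{' || c == '}') then c :: rppScan dropping r
    else rppScan dropping r

def remove_path_params_alt (path : String) : String :=
  if !(PySem.Str.isIn "/" path) && !(PySem.Str.isIn "=" path) then path
  else String.ofList (rppScan false path.toList)

-- ===== PRECONDITION & SPEC =====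
def Spec_remove_path_params (path : String) (out : String) : Prop := out = remove_path_params_alt path
instance (path : String) (out : String) : Decidable (Spec_remove_path_params path out) := by unfold Spec_remove_path_params; infer_instance

-- ===== CLAIM (what is proved, stated in full; the proofs are below) =====
def Claim_equal_remove_path_params : Prop := ∀ (path : String), Dom_remove_path_params path → Spec_remove_path_params path (remove_path_params path)

-- ===== LEMMAS AND PROOFS =====

-- simple split on a single separator character (proof-side model of path.split(sep))
def rppSp (s : Char) : List Char → List (List Char)
  | [] => [[]]
  | c :: r => if c = s then [] :: rppSp s r else (rppSp s r).modifyHead (c :: ·)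

-- proof-side model of the whole pipeline before the replace passes: the drop-flag scan
def rppSpec : Bool → List Char → List Char
  | _, [] => []
  | d, c :: r =>
    if c = '/' then '/' :: rppSpec false r
    else if c = '=' then rppSpec true r
    else if d then rppSpec true r
    else c :: rppSpec false r

theorem rppSp_ne_nil (s : Char) (l : List Char) : rppSp s l ≠ [] := by
  induction l with
  | nil => simp [rppSp]
  | cons c r ih =>
    simp only [rppSp]
    split
    · simp
    · cases h : rppSp s r with
      | nil => exact absurd h ih
      | cons a t => simp

theorem rppSplitOn_go (s : Char) (fuel : Nat) (l cur : List Char) (acc2 : List (List Char))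
    (h : l.length ≤ fuel) :
    PySem.Chars.splitOn.go [s] fuel l cur acc2 =
      acc2.reverse ++ (rppSp s l).modifyHead (cur.reverse ++ ·) := by
  induction fuel generalizing l cur acc2 with
  | zero =>
    interval_cases hl : l.length
    cases l with
    | nil => simp [PySem.Chars.splitOn.go, rppSp]
    | cons c r => simp at hl
  | succ fuel ih =>
    cases l with
    | nil => simp [PySem.Chars.splitOn.go, rppSp]
    | cons c r =>
      simp only [PySem.Chars.splitOn.go]
      by_cases hc : c = s
      · subst hc
        rw [if_pos (by simp [List.isPrefixOf])]
        simp only [List.length_cons, List.length_nil, Nat.zero_add, List.drop_succ_cons, List.drop_zero]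
        rw [ih r [] (cur.reverse :: acc2) (by simpa using Nat.le_of_succ_le_succ (by simpa using h))]
        simp only [rppSp]
        simp
        cases rppSp c r <;> rfl
      · rw [if_neg (by simp [List.isPrefixOf]; exact fun hh => hc hh.symm)]
        rw [ih r (c :: cur) acc2 (by simpa using Nat.le_of_succ_le_succ (by simpa using h))]
        simp only [rppSp, if_neg hc]
        cases hsp : rppSp s r with
        | nil => exact absurd hsp (rppSp_ne_nil s r)
        | cons a t => simp

theorem rppSplitOn_eq (s : Char) (l : List Char) :
    PySem.Chars.splitOn l [s] = rppSp s l := by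
  rw [PySem.Chars.splitOn, rppSplitOn_go s (l.length + 1) l [] [] (by omega)]
  cases h : rppSp s l with
  | nil => exact absurd h (rppSp_ne_nil s l)
  | cons a t => simp

theorem rppReplace_go (c : Char) (fuel : Nat) (l acc : List Char) (h : l.length ≤ fuel) :
    PySem.Chars.replace.go [c] [] fuel l acc = acc.reverse ++ l.filter (fun x => !(x == c)) := by
  induction fuel generalizing l acc with
  | zero =>
    cases l with
    | nil => simp [PySem.Chars.replace.go]
    | cons a r => simp at h
  | succ fuel ih =>
    cases l with
    | nil => simp [PySem.Chars.replace.go]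
    | cons a r =>
      simp only [PySem.Chars.replace.go]
      by_cases hc : a = c
      · subst hc
        rw [if_pos (by simp [List.isPrefixOf])]
        simp only [List.length_cons, List.length_nil, Nat.zero_add, List.drop_succ_cons, List.drop_zero,
          List.reverse_nil, List.nil_append]
        rw [ih r acc (by simpa using Nat.le_of_succ_le_succ (by simpa using h))]
        simp
      · rw [if_neg (by simp [List.isPrefixOf]; exact fun hh => hc hh.symm)]
        rw [ih r (a :: acc) (by simpa using Nat.le_of_succ_le_succ (by simpa using h))]
        simp [hc]

theorem rppReplace_eq (c : Char) (l : List Char) :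
    PySem.Chars.replace l [c] [] = l.filter (fun x => !(x == c)) := by
  rw [PySem.Chars.replace]
  rw [if_neg (by simp)]
  exact rppReplace_go c l.length l [] le_rfl

theorem rppIsIn_single (c : Char) (l : List Char) :
    PySem.Chars.isIn [c] l = l.contains c := by
  by_cases h : c ∈ l
  · rw [List.contains_eq_mem, decide_eq_true h]
    rw [(PySem.Chars.isIn_iff_infix [c] l).2]
    obtain ⟨s, t, rfl⟩ := List.append_of_mem h
    exact ⟨s, t, by simp⟩
  · rw [List.contains_eq_mem, decide_eq_false h]
    rw [PySem.Chars.isIn_eq_false_iff]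
    intro hin
    exact h (hin.sublist.subset (List.mem_singleton_self c))

theorem rppSp_headD (c : Char) (l : List Char) :
    (rppSp c l).headD [] = l.takeWhile (fun x => !(x == c)) := by
  induction l with
  | nil => simp [rppSp]
  | cons a r ih =>
    simp only [rppSp, List.takeWhile]
    by_cases h : a = c
    · simp [h]
    · rw [if_neg h]
      cases hsp : rppSp c r with
      | nil => exact absurd hsp (rppSp_ne_nil c r)
      | cons x t => simp [← ih, hsp, beq_false_of_ne h]

theorem rppToken_char (t : List Char) :
    rppToken t = if t.contains '=' then t.takeWhile (fun x => !(x == '=')) else t := by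
  rw [rppToken, rppIsIn_single, rppSplitOn_eq, rppSp_headD]

theorem rppToken_cons (c : Char) (h : List Char) (hc : c ≠ '=') :
    rppToken (c :: h) = c :: rppToken h := by
  rw [rppToken_char, rppToken_char]
  have he : ¬('=' = c) := fun e => hc e.symm
  by_cases hh : '=' ∈ h <;> simp [hh, he, beq_false_of_ne hc]

theorem rppJoin_cons_head (c : Char) (x : List Char) (ps : List (List Char)) :
    PySem.Chars.join ['/'] ((c :: x) :: ps) = c :: PySem.Chars.join ['/'] (x :: ps) := by
  cases ps with
  | nil => simp [PySem.Chars.join, List.intercalate]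
  | cons y q => rw [PySem.Chars.join_cons_cons, PySem.Chars.join_cons_cons]; simp

theorem rppToken_nil : rppToken [] = [] := by decide

theorem rppMain (cs : List Char) :
    PySem.Chars.join ['/'] ((rppSp '/' cs).map rppToken) = rppSpec false cs ∧
    PySem.Chars.join ['/'] ([] :: ((rppSp '/' cs).tail.map rppToken)) = rppSpec true cs := by
  induction cs with
  | nil => constructor <;> decide
  | cons c r ih =>
    obtain ⟨iha, ihb⟩ := ih
    by_cases hc : c = '/'
    · subst hc
      have hsp' : rppSp '/' ('/' :: r) = [] :: rppSp '/' r := by simp [rppSp]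
      cases hsp : (rppSp '/' r).map rppToken with
      | nil => exact absurd (List.map_eq_nil_iff.1 hsp) (rppSp_ne_nil '/' r)
      | cons a t =>
        rw [hsp] at iha
        constructor
        · rw [hsp', List.map_cons, rppToken_nil, hsp, PySem.Chars.join_cons_cons, iha]
          simp [rppSpec]
        · rw [hsp', List.tail_cons, hsp, PySem.Chars.join_cons_cons, iha]
          simp [rppSpec]
    · obtain ⟨h, t, hsp⟩ := List.exists_cons_of_ne_nil (rppSp_ne_nil '/' r)
      have hspc : rppSp '/' (c :: r) = (c :: h) :: t := by
        simp [rppSp, if_neg hc, hsp]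
      by_cases he : c = '='
      · subst he
        constructor
        · rw [hspc, List.map_cons,
            show rppToken ('=' :: h) = [] by rw [rppToken_char]; simp]
          rw [hsp] at ihb
          simp only [List.tail_cons] at ihb
          rw [ihb]
          simp [rppSpec, hc]
        · rw [hspc, List.tail_cons]
          rw [hsp] at ihb
          simp only [List.tail_cons] at ihb
          rw [ihb]
          simp [rppSpec, hc]
      · constructor
        · rw [hspc, List.map_cons, rppToken_cons c h he, rppJoin_cons_head,
            show rppToken h :: t.map rppToken = (rppSp '/' r).map rppToken by rw [hsp]; rfl,
            iha]
          simp [rppSpec, hc, he]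
        · rw [hspc, List.tail_cons]
          rw [hsp] at ihb
          simp only [List.tail_cons] at ihb
          rw [ihb]
          simp [rppSpec, hc, he]

theorem rppFilter_spec (d : Bool) (l : List Char) :
    (rppSpec d l).filter (fun x => !(x == ' ') && !(x == '{') && !(x == '}')) = rppScan d l := by
  induction l generalizing d with
  | nil => simp [rppSpec, rppScan]
  | cons c r ih =>
    simp only [rppSpec, rppScan]
    by_cases hc : c = '/'
    · subst hc
      simp [ih]
    · rw [if_neg hc, if_neg hc]
      by_cases he : c = '='
      · subst he
        simp [ih]
      · rw [if_neg he, if_neg he]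
        cases d with
        | true => simp [ih]
        | false =>
          cases h1 : c == ' ' <;> cases h2 : c == '{' <;> cases h3 : c == '}' <;>
            simp [h1, h2, h3, ih]

-- ===== VERDICT (by name: the statement is the Claim_ definition above) =====
theorem remove_path_params_spec : Claim_equal_remove_path_params := by
  intro path _
  unfold Spec_remove_path_params remove_path_params remove_path_params_alt
  split
  · rfl
  · dsimp only
    congr 1
    rw [rppReplace_eq, rppReplace_eq, rppReplace_eq, rppSplitOn_eq, (rppMain path.toList).1]
    rw [List.filter_filter, List.filter_filter, ← rppFilter_spec]
    apply List.filter_congr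
    intro c _
    cases c == ' ' <;> cases c == '{' <;> cases c == '}' <;> rfl
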